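-- pv_equiv track=rewrite | github.com/alis-khadka/llm_program_grader | dataset/solutions/21_22-1-1-python/5VESTZI2.py | calc
-- ===== SOURCE A (Python) =====
-- def calc(n):
--     if n == 0:
--         return 0
--     else:
--         fix = 1
--         if n % 2 == 1:
--             n -= 1
--             fix = 2
--         res = calc(int(n)//2) + 1 % 1000000007
--         return ( res*res*fix - 1 ) % 1000000007
-- ===== SOURCE B (Python) =====
-- def calc(n):
--     # Iterative two-phase version: record parity "fixes" top-down, then fold bottom-up.
--     if n == 0:
--         return 0
--     fixes = []
--     v = n
--     while v != 0:
--         if v % 2 == 1: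
--             fixes.append(2)
--             v -= 1
--         else:
--             fixes.append(1)
--         v = int(v) // 2
--     val = 0
--     for fix in reversed(fixes):
--         res = val + 1
--         val = (res * res * fix - 1) % 1000000007
--     return val
-- ===== Notes on version B (the rewrite author's own statement) =====
-- stated objective: alternative
-- what changed: Replaces the recursive halving with an explicit two-phase iteration: a while-loop records the parity factor at each halving step into a list, then a reversed fold rebuilds the value bottom-up (the recursion stack is made explicit).
import Mathlib
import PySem

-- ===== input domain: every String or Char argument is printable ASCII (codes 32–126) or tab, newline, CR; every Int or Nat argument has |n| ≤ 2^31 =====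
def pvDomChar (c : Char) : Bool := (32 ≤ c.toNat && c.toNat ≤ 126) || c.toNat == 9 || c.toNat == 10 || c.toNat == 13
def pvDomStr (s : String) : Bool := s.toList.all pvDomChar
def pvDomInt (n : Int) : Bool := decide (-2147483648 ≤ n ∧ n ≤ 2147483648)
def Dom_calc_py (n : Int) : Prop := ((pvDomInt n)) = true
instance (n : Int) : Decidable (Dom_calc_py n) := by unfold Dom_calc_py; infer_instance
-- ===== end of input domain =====

-- B replaces A's recursion by an explicit two-phase iteration (record parity fixes, fold back);
-- equivalence is claimed for n ≥ 0 (Pre_), where A returns.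

-- ===== PORT A =====
-- A recurses on a nonnegative value halved each step; ported as structural recursion on Nat
-- (faithful on Pre_calc_py, i.e. n ≥ 0; for negative n the Python raises RecursionError).
def calcPyGo : Nat → Int
  | 0 => 0
  | Nat.succ k =>
    -- fix = 2 and n -= 1 on the odd branch, fix = 1 otherwise, then recurse on n // 2
    if Nat.succ k % 2 == 1 then
      let res := calcPyGo ((Nat.succ k - 1) / 2) + 1 % 1000000007
      (res * res * 2 - 1) % 1000000007
    else
      let res := calcPyGo (Nat.succ k / 2) + 1 % 1000000007
      (res * res * 1 - 1) % 1000000007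
  decreasing_by all_goals omega

def calc_py (n : Int) : Int := calcPyGo n.toNat

-- ===== PORT B =====
-- the while-loop of Source B collecting the parity factor at each halving step
def fixesOf : Nat → List Int
  | 0 => []
  | Nat.succ k =>
    let v := Nat.succ k
    if v % 2 == 1 then 2 :: fixesOf ((v - 1) / 2)
    else 1 :: fixesOf (v / 2)
  decreasing_by all_goals omega

-- one step of Source B's for-loop over reversed(fixes)
def foldFix (val : Int) (fix : Int) : Int :=
  let res := val + 1
  (res * res * fix - 1) % 1000000007

def calc_py_alt (n : Int) : Int :=
  if n = 0 then 0
  else (fixesOf n.toNat).reverse.foldl foldFix 0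

-- ===== PRECONDITION & SPEC =====
-- Pre_ excludes negative n, on which the Python A raises RecursionError (never returns).
def Pre_calc_py (n : Int) : Prop := 0 ≤ n
instance (n : Int) : Decidable (Pre_calc_py n) := by unfold Pre_calc_py; infer_instance
def pvWitness_calc_py : Int := (6)

def Spec_calc_py (n : Int) (out : Int) : Prop := out = calc_py_alt n
instance (n : Int) (out : Int) : Decidable (Spec_calc_py n out) := by unfold Spec_calc_py; infer_instance

-- ===== CLAIM (what is proved, stated in full; the proofs are below) =====
def Claim_equal_calc_py : Prop := ∀ (n : Int), Dom_calc_py n → Pre_calc_py n → Spec_calc_py n (calc_py n)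

-- ===== LEMMAS AND PROOFS =====

theorem calcPyGo_eq_foldr (m : Nat) :
    calcPyGo m = (fixesOf m).foldr (fun fix val => foldFix val fix) 0 := by
  induction m using Nat.strong_induction_on with
  | _ m ih =>
    match m with
    | 0 => rw [calcPyGo, fixesOf]; rfl
    | Nat.succ k =>
      rw [calcPyGo, fixesOf]
      by_cases h : Nat.succ k % 2 == 1
      · simp only [if_pos h, List.foldr_cons]
        rw [ih ((Nat.succ k - 1) / 2) (by omega)]
        simp [foldFix]
      · simp only [if_neg h, List.foldr_cons]
        rw [ih (Nat.succ k / 2) (by omega)]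
        simp [foldFix]

theorem calc_py_spec : Claim_equal_calc_py := by
  intro n _ hpre
  unfold Spec_calc_py calc_py calc_py_alt
  by_cases h0 : n = 0
  · rw [h0]; rw [if_pos rfl]; rw [show (0:Int).toNat = 0 from rfl, calcPyGo]
  · rw [if_neg h0, List.foldl_reverse, calcPyGo_eq_foldr]
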